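-- pv_equiv track=rewrite | github.com/abdullaahsajid/Disease-Predictor-Dsa-Final-Project | app.py | calculate
-- ===== SOURCE A (Python) =====
-- def calculate(user_symptoms, disease_symptoms):
--     score = 0
--     for u in user_symptoms:
--         for d in disease_symptoms:
--             if u == d:
--                 if d in ["fever", "cough", "chills"]:
--                     score += 2
--                 else:
--                     score += 1
--     return score
-- ===== SOURCE B (Python) =====
-- def calculate(user_symptoms, disease_symptoms):
--     # One pass over each list to build count dictionaries, then one pass
--     # over the distinct user symptoms: score = sum of
--     # count_user(s) * count_disease(s) * weight(s).
--     cu = {}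
--     for s in user_symptoms:
--         cu[s] = cu.get(s, 0) + 1
--     cd = {}
--     for s in disease_symptoms:
--         cd[s] = cd.get(s, 0) + 1
--     score = 0
--     for s, c in cu.items():
--         w = 2 if s in ("fever", "cough", "chills") else 1
--         score += c * cd.get(s, 0) * w
--     return score
-- ===== Notes on version B (the rewrite author's own statement) =====
-- stated objective: faster
-- what changed: Replaces the nested loop over all user/disease symptom pairs by two counting dictionaries built in one pass each, then a single pass over the distinct user symptoms summing count_user*count_disease*weight.
import Mathlib
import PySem

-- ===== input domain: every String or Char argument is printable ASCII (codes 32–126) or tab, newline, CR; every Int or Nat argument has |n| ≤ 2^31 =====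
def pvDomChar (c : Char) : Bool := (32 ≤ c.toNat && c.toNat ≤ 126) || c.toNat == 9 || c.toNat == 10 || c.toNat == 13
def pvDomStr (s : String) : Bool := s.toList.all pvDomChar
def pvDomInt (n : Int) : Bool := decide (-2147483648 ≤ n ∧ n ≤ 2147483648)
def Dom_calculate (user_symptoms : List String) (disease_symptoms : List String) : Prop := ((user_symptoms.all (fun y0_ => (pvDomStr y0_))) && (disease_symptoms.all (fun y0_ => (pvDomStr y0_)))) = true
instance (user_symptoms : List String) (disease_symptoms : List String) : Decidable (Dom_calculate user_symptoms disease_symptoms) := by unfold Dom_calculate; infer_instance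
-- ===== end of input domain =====

-- B replaces A's nested pair loop by two one-pass count dictionaries and a single
-- pass over the distinct user symptoms (asymptotically faster: O(n+m) vs O(n*m)).


-- ===== PORT A =====
def calculate (user_symptoms : List String) (disease_symptoms : List String) : Int :=
  user_symptoms.foldl (fun score u =>
    disease_symptoms.foldl (fun score d =>
      if u == d then
        (if d ∈ ["fever", "cough", "chills"] then score + 2 else score + 1)
      else score) score) 0

-- ===== PORT B =====
def calculate_alt (user_symptoms : List String) (disease_symptoms : List String) : Int :=
  let cu := user_symptoms.foldl (fun m s => m.insert s (m.getD s 0 + 1))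
      (PySem.Dict.empty : PySem.Dict String Int)
  let cd := disease_symptoms.foldl (fun m s => m.insert s (m.getD s 0 + 1))
      (PySem.Dict.empty : PySem.Dict String Int)
  cu.items.foldl (fun score p =>
    let w : Int := if p.1 ∈ ["fever", "cough", "chills"] then 2 else 1
    score + p.2 * cd.getD p.1 0 * w) 0

-- ===== PRECONDITION & SPEC =====
def Spec_calculate (user_symptoms : List String) (disease_symptoms : List String) (out : Int) : Prop := out = calculate_alt user_symptoms disease_symptoms
instance (user_symptoms : List String) (disease_symptoms : List String) (out : Int) : Decidable (Spec_calculate user_symptoms disease_symptoms out) := by unfold Spec_calculate; infer_instance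

-- ===== CLAIM (what is proved, stated in full; the proofs are below) =====
def Claim_equal_calculate : Prop := ∀ (user_symptoms : List String) (disease_symptoms : List String), Dom_calculate user_symptoms disease_symptoms → Spec_calculate user_symptoms disease_symptoms (calculate user_symptoms disease_symptoms)

-- ===== LEMMAS AND PROOFS =====

-- weight of a symptom (proof-side abbreviation for the condition both ports test)
def pvWt (s : String) : Int := if s ∈ ["fever", "cough", "chills"] then 2 else 1

-- A's inner loop over the disease list adds (count of u) * (weight of u)
lemma inner_loop_eq (u : String) :
    ∀ (ds : List String) (sc : Int),
      ds.foldl (fun score d =>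
        if u == d then
          (if d ∈ ["fever", "cough", "chills"] then score + 2 else score + 1)
        else score) sc = sc + (ds.count u : Int) * pvWt u := by
  intro ds
  induction ds with
  | nil => intro sc; simp
  | cons d t ih =>
    intro sc
    rw [List.foldl_cons]
    by_cases h : u = d
    · subst h
      rw [if_pos (by simp), ih, List.count_cons_self]
      unfold pvWt
      split_ifs with hw <;> push_cast <;> ring
    · rw [if_neg (by simp [h]), ih, List.count_cons_of_ne (Ne.symm h)]

-- A's outer loop is the sum over user symptoms of count * weight
lemma calc_a_eq (ds : List String) :
    ∀ (us : List String) (sc : Int),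
      us.foldl (fun score u =>
        ds.foldl (fun score d =>
          if u == d then
            (if d ∈ ["fever", "cough", "chills"] then score + 2 else score + 1)
          else score) score) sc
      = sc + (us.map (fun u => (ds.count u : Int) * pvWt u)).sum := by
  intro us
  induction us with
  | nil => intro sc; simp
  | cons u t ih =>
    intro sc
    rw [List.foldl_cons, ih, inner_loop_eq]
    simp only [List.map_cons, List.sum_cons]
    ring

-- splitting a sum at one key: total = (count of k) * g k + sum over the rest
lemma sum_split (g : String → Int) (k : String) :
    ∀ (l : List String),
      (l.map g).sum
        = (l.count k : Int) * g k + ((l.filter (fun x => !(x == k))).map g).sum := by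
  intro l
  induction l with
  | nil => simp
  | cons x t ih =>
    by_cases h : x = k
    · subst h
      simp only [List.map_cons, List.sum_cons, List.count_cons_self, List.filter_cons,
        beq_self_eq_true, Bool.not_true, ih]
      push_cast; ring
    · have hb : (x == k) = false := by simp [h]
      simp only [List.map_cons, List.sum_cons, List.filter_cons, hb, Bool.not_false, if_true,
        List.count_cons, ih]
      simp only [Bool.false_eq_true, if_false, add_zero]
      ring

-- counts of other keys survive filtering k out
lemma count_filter_ne (k k' : String) (h : k' ≠ k) (l : List String) :
    (l.filter (fun x => !(x == k))).count k' = l.count k' := by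
  rw [List.count_filter]
  simp [h]

-- the distinct-key sum equals the plain sum, for any nodup key list covering l
lemma dedup_sum (g : String → Int) :
    ∀ (S l : List String), S.Nodup → (∀ x ∈ l, x ∈ S) →
      (S.map (fun k => (l.count k : Int) * g k)).sum = (l.map g).sum := by
  intro S
  induction S with
  | nil =>
    intro l _ hcov
    have : l = [] := by
      cases l with
      | nil => rfl
      | cons x t => exact absurd (hcov x (List.mem_cons_self)) (by simp)
    subst this; simp
  | cons k S' ih =>
    intro l hnd hcov
    have hnd' : S'.Nodup := hnd.of_cons
    have hknot : k ∉ S' := by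
      have := List.nodup_cons.mp hnd; exact this.1
    have hcov' : ∀ x ∈ l.filter (fun x => !(x == k)), x ∈ S' := by
      intro x hx
      have hxl : x ∈ l := List.mem_of_mem_filter hx
      have hxk : x ≠ k := by
        have := List.of_mem_filter hx; simpa using this
      rcases List.mem_cons.mp (hcov x hxl) with h | h
      · exact absurd h hxk
      · exact h
    have hrec := ih (l.filter (fun x => !(x == k))) hnd' hcov'
    have hcounts : ∀ k' ∈ S',
        ((l.filter (fun x => !(x == k))).count k' : Int) = (l.count k' : Int) := by
      intro k' hk'
      have : k' ≠ k := fun h => hknot (h ▸ hk')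
      rw [count_filter_ne k k' this l]
    have hmapeq :
        (S'.map (fun k' => ((l.filter (fun x => !(x == k))).count k' : Int) * g k')).sum
          = (S'.map (fun k' => (l.count k' : Int) * g k')).sum := by
      apply congrArg
      apply List.map_congr_left
      intro k' hk'
      rw [hcounts k' hk']
    rw [List.map_cons, List.sum_cons, ← hmapeq, hrec, ← sum_split g k l]

-- B's final loop as a sum
lemma b_loop_eq (cd : PySem.Dict String Int) :
    ∀ (items : List (String × Int)) (sc : Int),
      items.foldl (fun score p =>
        let w : Int := if p.1 ∈ ["fever", "cough", "chills"] then 2 else 1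
        score + p.2 * cd.getD p.1 0 * w) sc
      = sc + (items.map (fun p => p.2 * cd.getD p.1 0 * pvWt p.1)).sum := by
  intro items
  induction items with
  | nil => intro sc; simp
  | cons p t ih =>
    intro sc
    simp only [List.foldl_cons, List.map_cons, List.sum_cons, ih, pvWt]
    ring

-- ===== VERDICT (by name: the statement is the Claim_ definition above) =====
theorem calculate_spec : Claim_equal_calculate := by
  intro us ds _
  unfold Spec_calculate calculate calculate_alt
  rw [PySem.Dict.foldl_insert_getD_add_one_eq_counter,
      PySem.Dict.foldl_insert_getD_add_one_eq_counter]
  rw [calc_a_eq, b_loop_eq, PySem.Dict.items_counter]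
  rw [List.map_map]
  have hmap :
      ((PySem.Set.ofList us).map
          ((fun p : String × Int => p.2 * (PySem.Dict.counter ds).getD p.1 0 * pvWt p.1) ∘
            fun k => (k, (us.count k : Int)))).sum
        = ((PySem.Set.ofList us).map
            (fun k => (ds.count k : Int) * pvWt k * (us.count k : Int))).sum := by
    apply congrArg
    apply List.map_congr_left
    intro k _
    simp only [Function.comp, PySem.Dict.getD_counter]
    ring
  rw [hmap]
  have hd := dedup_sum (fun u => (ds.count u : Int) * pvWt u) (PySem.Set.ofList us) us
      (PySem.Set.nodup_ofList us) (fun x hx => (PySem.Set.mem_ofList us x).mpr hx)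
  simp only [zero_add]
  rw [← hd]
  apply congrArg
  apply List.map_congr_left
  intro k _
  ring
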